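-- pv_equiv track=rewrite | github.com/GitMonsters/octotetrahedral-agi | arc-puzzle-catalog/re-arc/solves/2c3c6858/solver.py | transform
-- ===== SOURCE A (Python) =====
-- from collections import Counter
--
-- def transform(grid):
--     """
--     ARC puzzle 2c3c6858: For each row, if the marker pixel (non-background)
--     is in the left third of the grid, fill the row with 4 (yellow).
--     Otherwise, fill with 9 (maroon).
--     """
--     height = len(grid)
--     width = len(grid[0])
--     threshold = width // 3
--
--     # Find background color (most common)
--     all_vals = [v for row in grid for v in row]
--     bg_color = Counter(all_vals).most_common(1)[0][0]
--
--     result = []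
--     for row in grid:
--         # Find marker position (first non-background pixel)
--         marker_col = None
--         for col, val in enumerate(row):
--             if val != bg_color:
--                 marker_col = col
--                 break
--
--         # If marker in left third, row becomes yellow (4), else maroon (9)
--         if marker_col is not None and marker_col < threshold:
--             result.append([4] * width)
--         else:
--             result.append([9] * width)
--
--     return result
-- ===== SOURCE B (Python) =====
-- from collections import Counter
--
-- def transform(grid):
--     height = len(grid)
--     width = len(grid[0])
--     threshold = width // 3
--     bg = Counter(v for row in grid for v in row).most_common(1)[0][0]
--     # Stage 1: column-major sweep over the left-third columns, OR-ing a
--     # boolean flag per row ("this row has a non-background cell there").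
--     marked = [False] * height
--     for col in range(threshold):
--         marked = [m or (col < len(row) and row[col] != bg)
--                   for m, row in zip(marked, grid)]
--     # Stage 2: emit the rows from the flag vector.
--     return [[4] * width if m else [9] * width for m in marked]
-- ===== Notes on version B (the rewrite author's own statement) =====
-- stated objective: alternative
-- what changed: Replaces A's per-row first-marker search (enumerate/break then threshold comparison) by a staged column-major algorithm: a boolean flag vector over rows is OR-updated while sweeping the left-third columns one at a time, and a second pass emits each row's fill color from its flag.
import Mathlib
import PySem

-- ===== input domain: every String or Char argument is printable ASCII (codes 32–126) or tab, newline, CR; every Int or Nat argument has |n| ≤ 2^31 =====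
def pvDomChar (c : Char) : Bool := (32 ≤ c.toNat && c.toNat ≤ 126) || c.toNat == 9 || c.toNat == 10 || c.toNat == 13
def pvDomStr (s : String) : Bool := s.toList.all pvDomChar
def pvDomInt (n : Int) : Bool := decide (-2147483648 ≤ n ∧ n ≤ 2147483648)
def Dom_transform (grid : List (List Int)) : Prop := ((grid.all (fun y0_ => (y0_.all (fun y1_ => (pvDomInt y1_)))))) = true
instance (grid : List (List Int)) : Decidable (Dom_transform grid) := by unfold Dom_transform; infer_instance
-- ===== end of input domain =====

-- B replaces A's per-row first-marker search by a staged column-major sweep: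
-- a boolean flag per row is OR-updated column by column over the left third,
-- then a second pass emits the rows from the flags; objective: alternative.


-- ===== PORT A =====
-- A's inner enumerate/break search for the first non-background column.
def findMarkerA (bg : Int) (row : List Int) (col : Int) : Option Int :=
  match row with
  | [] => none
  | v :: rest => if v ≠ bg then some col else findMarkerA bg rest (col + 1)

-- Counter(xs).most_common(1)[0][0] = first key of maximal count (heapq.nlargest is
-- stable, counter keys are in first-seen order): first extremal item of .items — exact.
def transform (grid : List (List Int)) : List (List Int) :=
  match grid with
  | [] => []  -- Python: grid[0] raises IndexError (excluded by Pre_transform)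
  | row0 :: _ =>
    let width := row0.length
    let threshold : Int := PySem.Int.floordiv (width : Int) 3
    let all_vals := grid.flatMap (fun row => row)
    match PySem.List.max? (PySem.Dict.counter all_vals).items (fun kv => kv.2) with
    | none => []  -- Python: most_common(1)[0] raises IndexError (excluded by Pre_transform)
    | some (bg_color, _) =>
      grid.foldl (fun result row =>
        result ++ [match findMarkerA bg_color row 0 with
                   | some c => if c < threshold then List.replicate width (4 : Int)
                               else List.replicate width (9 : Int)
                   | none => List.replicate width (9 : Int)]) []

-- ===== PORT B =====
-- Python's 'col < len(row) and row[col] != bg' (col ≥ 0 here; the guard makes the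
-- 0-default getD exact).
def colCheck (bg : Int) (col : Int) (row : List Int) : Bool :=
  decide (col < (row.length : Int)) && decide (row.getD col.toNat 0 ≠ bg)

def transform_alt (grid : List (List Int)) : List (List Int) :=
  match grid with
  | [] => []  -- Python: grid[0] raises IndexError (excluded by Pre_transform)
  | row0 :: rest =>
    let g := row0 :: rest
    let height := g.length
    let width := row0.length
    let threshold : Int := PySem.Int.floordiv (width : Int) 3
    match PySem.List.max? (PySem.Dict.counter (g.flatMap (fun row => row))).items (fun kv => kv.2) with
    | none => []  -- Python: most_common(1)[0] raises IndexError (excluded by Pre_transform)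
    | some (bg, _) =>
      let marked := (PySem.List.pyRange 0 threshold 1).foldl
        (fun marked col => List.zipWith (fun m row => m || colCheck bg col row) marked g)
        (List.replicate height false)
      marked.map (fun m => if m then List.replicate width (4 : Int) else List.replicate width 9)

-- ===== PRECONDITION & SPEC =====
-- A raises IndexError when the grid is empty (grid[0]) or every row is empty
-- (most_common(1)[0] on an empty Counter); exactly those inputs are excluded.
def Pre_transform (grid : List (List Int)) : Prop :=
  grid ≠ [] ∧ grid.flatMap (fun row => row) ≠ []
instance (grid : List (List Int)) : Decidable (Pre_transform grid) := by
  unfold Pre_transform; infer_instance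
def pvWitness_transform : List (List Int) := [[0, 0, 4], [4, 0, 0], [0, 0, 0]]

def Spec_transform (grid : List (List Int)) (out : List (List Int)) : Prop := out = transform_alt grid
instance (grid : List (List Int)) (out : List (List Int)) : Decidable (Spec_transform grid out) := by unfold Spec_transform; infer_instance

-- ===== CLAIM (what is proved, stated in full; the proofs are below) =====
def Claim_equal_transform : Prop := ∀ (grid : List (List Int)), Dom_transform grid → Pre_transform grid → Spec_transform grid (transform grid)

-- ===== LEMMAS AND PROOFS =====
theorem findMarkerA_ge (bg : Int) (row : List Int) :
    ∀ (col c : Int), findMarkerA bg row col = some c → col ≤ c := by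
  induction row with
  | nil => intro col c h; simp [findMarkerA] at h
  | cons v rest ih =>
    intro col c h
    by_cases hv : v ≠ bg
    · simp [findMarkerA, hv] at h; omega
    · simp [findMarkerA, hv] at h
      have := ih (col + 1) c h
      omega

theorem marker_iff_take_any (bg : Int) (row : List Int) :
    ∀ (n : Nat) (col : Int),
      ((row.take n).any (fun v => decide (v ≠ bg)) = true)
        ↔ (∃ c, findMarkerA bg row col = some c ∧ c < col + n) := by
  induction row with
  | nil => intro n col; simp [findMarkerA]
  | cons v rest ih =>
    intro n col
    cases n with
    | zero =>
      simp only [List.take_zero, List.any_nil]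
      constructor
      · intro h; exact absurd h (by simp)
      · rintro ⟨c, hc, hlt⟩
        by_cases hv : v ≠ bg
        · simp [findMarkerA, hv] at hc; omega
        · simp [findMarkerA, hv] at hc
          have := findMarkerA_ge bg rest (col + 1) c hc
          omega
    | succ m =>
      by_cases hv : v ≠ bg
      · constructor
        · intro _
          refine ⟨col, by simp [findMarkerA, hv], ?_⟩
          have : (0 : Int) < ((m + 1 : Nat) : Int) := by exact_mod_cast Nat.succ_pos m
          omega
        · intro _; simp [hv]
      · simp only [List.take_succ_cons, List.any_cons, findMarkerA, if_neg hv]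
        have hv' : (decide (v ≠ bg)) = false := by simpa using hv
        rw [hv']
        simp only [Bool.false_or]
        rw [ih m (col + 1)]
        constructor
        · rintro ⟨c, hc, hlt⟩
          refine ⟨c, hc, ?_⟩
          have : ((m + 1 : Nat) : Int) = ((m : Nat) : Int) + 1 := by push_cast; ring
          omega
        · rintro ⟨c, hc, hlt⟩
          refine ⟨c, hc, ?_⟩
          have : ((m + 1 : Nat) : Int) = ((m : Nat) : Int) + 1 := by push_cast; ring
          omega

-- zipWith of a mapped copy of the same list collapses to one map
theorem zipWith_map_self {α β γ : Type} (g : β → α → γ) (f : α → β) (l : List α) :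
    List.zipWith g (l.map f) l = l.map (fun x => g (f x) x) := by
  induction l with
  | nil => rfl
  | cons a t ih => simp [ih]

-- one column step extends the take-any prefix test by one cell
theorem colCheck_take_succ (bg : Int) (n : Nat) (row : List Int) :
    ((row.take n).any (fun v => decide (v ≠ bg)) || colCheck bg (n : Int) row)
      = (row.take (n + 1)).any (fun v => decide (v ≠ bg)) := by
  rw [List.take_add_one, List.any_append]
  congr 1
  unfold colCheck
  by_cases h : n < row.length
  · have : row[n]?.toList = [row[n]] := by simp [List.getElem?_eq_getElem h]
    rw [this]
    simp [h]
  · have : row[n]?.toList = [] := by simp [List.getElem?_eq_none (by omega : row.length ≤ n)]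
    rw [this]
    simp [show ¬ ((n : Int) < (row.length : Int)) by exact_mod_cast h]

-- the column-major flag loop computes, per row, the take-any prefix test
theorem marked_invariant (bg : Int) (g : List (List Int)) (n : Nat) :
    (PySem.List.pyRange 0 (n : Int) 1).foldl
        (fun marked col => List.zipWith (fun m row => m || colCheck bg col row) marked g)
        (List.replicate g.length false)
      = g.map (fun row => (row.take n).any (fun v => decide (v ≠ bg))) := by
  induction n with
  | zero =>
    rw [PySem.List.pyRange_one_eq_nil (by omega)]
    simp [List.foldl_nil, List.map_const']
  | succ m ih =>
    have hsplit : PySem.List.pyRange 0 ((m + 1 : Nat) : Int) 1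
        = PySem.List.pyRange 0 (m : Int) 1 ++ [(m : Int)] := by
      have : ((m + 1 : Nat) : Int) = (m : Int) + 1 := by push_cast; ring
      rw [this, PySem.List.pyRange_one_succ_right (by omega)]
    rw [hsplit, List.foldl_append, ih]
    simp only [List.foldl_cons, List.foldl_nil]
    rw [zipWith_map_self]
    apply List.map_congr_left
    intro row _
    exact colCheck_take_succ bg m row

-- per-row agreement: A's marker search vs B's flag, for the actual threshold
theorem row_eq (bg : Int) (row : List Int) (width : Nat) :
    (match findMarkerA bg row 0 with
     | some c => if c < PySem.Int.floordiv (width : Int) 3 then List.replicate width (4 : Int)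
                 else List.replicate width (9 : Int)
     | none => List.replicate width (9 : Int))
    = (if (row.take (width / 3)).any (fun v => decide (v ≠ bg))
       then List.replicate width (4 : Int) else List.replicate width 9) := by
  have hthr : PySem.Int.floordiv (width : Int) 3 = ((width / 3 : Nat) : Int) := by
    exact_mod_cast PySem.Int.floordiv_natCast width 3
  rw [hthr]
  have hiff := marker_iff_take_any bg row (width / 3) 0
  simp only [zero_add] at hiff
  by_cases hany : (row.take (width / 3)).any (fun v => decide (v ≠ bg)) = true
  · obtain ⟨c, hc, hlt⟩ := hiff.mp hany
    rw [hc, hany, if_pos rfl]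
    dsimp only
    rw [if_pos hlt]
  · rw [Bool.not_eq_true] at hany
    rw [hany, if_neg (by simp)]
    cases hm : findMarkerA bg row 0 with
    | none => rfl
    | some c =>
      have hnlt : ¬ c < ((width / 3 : Nat) : Int) := by
        intro hlt
        have := hiff.mpr ⟨c, hm, hlt⟩
        rw [hany] at this
        exact absurd this (by simp)
      dsimp only
      rw [if_neg hnlt]

theorem pvFlatMapSingle {α β : Type} (f : α → β) (l : List α) :
    l.flatMap (fun x => [f x]) = l.map f := by
  induction l with
  | nil => rfl
  | cons a t ih => simp [ih]

-- ===== VERDICT (by name: the statement is the Claim_ definition above) =====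
theorem transform_spec : Claim_equal_transform := by
  intro grid _ hpre
  unfold Spec_transform transform transform_alt
  obtain ⟨hne, hflat⟩ := hpre
  cases grid with
  | nil => exact absurd rfl hne
  | cons row0 rest =>
    simp only
    cases hmax : PySem.List.max? (PySem.Dict.counter ((row0 :: rest).flatMap (fun row => row))).items
        (fun kv => kv.2) with
    | none =>
      exfalso
      rw [PySem.List.max?_eq_none_iff, PySem.Dict.items_counter, List.map_eq_nil_iff] at hmax
      cases hx : (row0 :: rest).flatMap (fun row => row) with
      | nil => exact hflat hx
      | cons a tl =>
        have ha : a ∈ PySem.Set.ofList ((row0 :: rest).flatMap (fun row => row)) := by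
          rw [PySem.Set.mem_ofList, hx]; simp
        rw [hmax] at ha
        exact absurd ha (by simp)
    | some kv =>
      obtain ⟨bg, cnt⟩ := kv
      dsimp only
      rw [PySem.List.foldl_append_eq_flatMap]
      simp only [List.nil_append]
      rw [pvFlatMapSingle]
      -- rewrite B's threshold as a Nat cast so the invariant applies
      have hthr : PySem.Int.floordiv ((row0.length : Int)) 3 = ((row0.length / 3 : Nat) : Int) := by
        exact_mod_cast PySem.Int.floordiv_natCast row0.length 3
    -- B side: collapse the flag loop, then map∘map
      conv_rhs => rw [hthr, marked_invariant bg (row0 :: rest) (row0.length / 3)]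
      rw [List.map_map]
      apply List.map_congr_left
      intro row _
      exact row_eq bg row row0.length
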